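-- pv_equiv track=rewrite | github.com/cheoljunpark/algorithm | 코딩테스트입문/진료순서 정하기.py | solution
-- ===== SOURCE A (Python) =====
-- def solution(emergency):
--     sorted_emergency = sorted(emergency, reverse=True)
--
--     a = {}
--
--     for i in sorted_emergency:
--         a[i] = sorted_emergency.index(i) + 1
--
--
--     answer = []
--
--     for i in emergency:
--         answer.append(a[i])
--
--     return answer
-- ===== SOURCE B (Python) =====
-- def solution(emergency):
--     # rank(v) = 1 + number of patients strictly more urgent than v.
--     # Tally frequencies, then one prefix-sum pass over the DISTINCT urgencies in
--     # descending order; no full-list sort, no list.index.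
--     cnt = {}
--     for w in emergency:
--         cnt[w] = cnt.get(w, 0) + 1
--     rank = {}
--     total = 0
--     for v in sorted(cnt, reverse=True):
--         rank[v] = total + 1
--         total += cnt[v]
--     return [rank[v] for v in emergency]
-- ===== Notes on version B (the rewrite author's own statement) =====
-- stated objective: faster
-- what changed: B never sorts the full list nor calls list.index: it tallies frequencies in a dict, walks the distinct urgencies once in descending order accumulating a prefix sum of counts to get each value's rank, then maps the input through it.
import Mathlib
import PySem

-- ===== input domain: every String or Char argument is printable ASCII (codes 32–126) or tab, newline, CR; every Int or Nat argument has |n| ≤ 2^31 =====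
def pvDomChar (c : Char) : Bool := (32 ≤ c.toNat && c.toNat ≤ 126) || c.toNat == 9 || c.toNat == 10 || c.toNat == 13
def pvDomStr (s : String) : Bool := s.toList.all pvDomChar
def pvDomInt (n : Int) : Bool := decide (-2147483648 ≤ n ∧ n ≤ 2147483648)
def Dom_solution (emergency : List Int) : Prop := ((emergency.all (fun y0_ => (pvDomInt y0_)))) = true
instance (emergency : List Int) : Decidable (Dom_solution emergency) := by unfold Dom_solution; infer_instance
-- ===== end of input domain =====

-- B replaces A's full-list sort + per-element list.index with a frequency dict and one
-- prefix-sum pass over the distinct urgencies in descending order (faster).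

-- ===== PORT A =====
-- a[i] = sorted_emergency.index(i) + 1 ; index() always succeeds (i is drawn from the list
-- itself), so the Option is read with getD 0; likewise a[i] in the second loop never misses.
def solution (emergency : List Int) : List Int :=
  let sorted_emergency := PySem.List.sorted emergency (fun x => x) true
  let a := sorted_emergency.foldl
    (fun d i => d.insert i (((PySem.List.index? sorted_emergency i).getD 0 : Int) + 1))
    PySem.Dict.empty
  emergency.foldl (fun answer i => answer ++ [a.getD i 0]) []

-- ===== PORT B =====
-- cnt[w] = cnt.get(w, 0) + 1 is the first fold; `for v in sorted(cnt, reverse=True)` iterates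
-- the dict's keys; rank[v] in the comprehension never misses (every v is a key), so getD 0.
def solution_alt (emergency : List Int) : List Int :=
  let cnt := emergency.foldl (fun d w => d.insert w (d.getD w 0 + 1))
    (PySem.Dict.empty : PySem.Dict Int Int)
  let rt := (PySem.List.sorted cnt.keys (fun x => x) true).foldl
    (fun (p : PySem.Dict Int Int × Int) v => (p.1.insert v (p.2 + 1), p.2 + cnt.getD v 0))
    (PySem.Dict.empty, 0)
  emergency.map (fun v => rt.1.getD v 0)

-- ===== PRECONDITION & SPEC =====
def Spec_solution (emergency : List Int) (out : List Int) : Prop := out = solution_alt emergency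
instance (emergency : List Int) (out : List Int) : Decidable (Spec_solution emergency out) := by unfold Spec_solution; infer_instance

-- ===== CLAIM =====
def Claim_equal_solution : Prop := ∀ (emergency : List Int), Dom_solution emergency → Spec_solution emergency (solution emergency)

-- ===== LEMMAS AND PROOFS =====

-- A's dict-building loop: the inserted value is a function of the key alone, so the final
-- lookup is that function on every key that occurs in the loop's list.
theorem getD_foldl_insert_keyfun (L : List Int) (f : Int → Int) (d0 : PySem.Dict Int Int)
    (x c : Int) :
    (L.foldl (fun d i => d.insert i (f i)) d0).getD x c
      = if x ∈ L then f x else d0.getD x c := by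
  induction L generalizing d0 with
  | nil => simp
  | cons h t ih =>
    simp only [List.foldl_cons, ih, List.mem_cons]
    by_cases hxt : x ∈ t
    · simp [hxt]
    · by_cases hxh : x = h
      · subst hxh; simp [hxt, PySem.Dict.getD_insert_self]
      · simp [hxt, hxh, PySem.Dict.getD_insert_of_ne _ _ _ hxh]

-- In a non-increasing list, the first index of a member x is the number of elements > x.
theorem index?_desc_eq_countP (s : List Int) (hs : s.Pairwise (fun a b => b ≤ a))
    (x : Int) (hx : x ∈ s) :
    PySem.List.index? s x = some (s.countP (fun w => decide (x < w))) := by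
  induction s with
  | nil => cases hx
  | cons h t ih =>
    have hh : ∀ b ∈ t, b ≤ h := (List.pairwise_cons.mp hs).1
    have ht : t.Pairwise (fun a b => b ≤ a) := (List.pairwise_cons.mp hs).2
    by_cases hxh : x = h
    · subst hxh
      have hz : t.countP (fun w => decide (x < w)) = 0 := by
        rw [List.countP_eq_zero]
        intro w hw
        simpa using not_lt.mpr (hh w hw)
      rw [PySem.List.index?_cons_self, List.countP_cons, hz]
      simp
    · have hxt : x ∈ t := by
        rcases List.mem_cons.mp hx with h1 | h1
        · exact absurd h1 hxh
        · exact h1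
      have hxlth : x < h := lt_of_le_of_ne (hh x hxt) hxh
      rw [PySem.List.index?_cons_of_ne _ (Ne.symm hxh), ih ht hxt, List.countP_cons]
      simp [hxlth]

-- B's rank loop leaves absent keys alone.
theorem rankfold_getD_not_mem (f : Int → Int) (L : List Int)
    (d0 : PySem.Dict Int Int) (t0 : Int) (x c : Int) (hx : x ∉ L) :
    ((L.foldl (fun p v => (p.1.insert v (p.2 + 1), p.2 + f v)) (d0, t0)).1).getD x c
      = d0.getD x c := by
  induction L generalizing d0 t0 with
  | nil => simp
  | cons h t ih =>
    have hxh : x ≠ h := fun h1 => hx (h1 ▸ List.mem_cons_self)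
    have hxt : x ∉ t := fun h1 => hx (List.mem_cons_of_mem _ h1)
    simp only [List.foldl_cons]
    rw [ih _ _ hxt, PySem.Dict.getD_insert_of_ne _ _ _ hxh]

-- B's rank loop: a member x of a duplicate-free list gets 1 + the running total at its slot,
-- i.e. t0 + (sum of f over the elements strictly before x) + 1.
theorem rankfold_getD_mem (f : Int → Int) (L : List Int)
    (d0 : PySem.Dict Int Int) (t0 : Int) (x c : Int) (hnd : L.Nodup) (hx : x ∈ L) :
    ((L.foldl (fun p v => (p.1.insert v (p.2 + 1), p.2 + f v)) (d0, t0)).1).getD x c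
      = t0 + ((L.takeWhile (fun u => u != x)).map f).sum + 1 := by
  induction L generalizing d0 t0 with
  | nil => cases hx
  | cons h t ih =>
    simp only [List.foldl_cons]
    by_cases hxh : x = h
    · subst hxh
      have hxt : x ∉ t := (List.nodup_cons.mp hnd).1
      rw [rankfold_getD_not_mem _ _ _ _ _ _ hxt, PySem.Dict.getD_insert_self]
      simp
    · have hxt : x ∈ t := by
        rcases List.mem_cons.mp hx with h1 | h1
        · exact absurd h1 hxh
        · exact h1
      rw [ih _ _ (List.nodup_cons.mp hnd).2 hxt]
      have : (h != x) = true := by simp [Ne.symm hxh]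
      simp only [List.takeWhile_cons, this, if_true, List.map_cons, List.sum_cons]
      ring

-- In a strictly decreasing list, the prefix before member x is exactly the elements > x.
theorem takeWhile_desc_eq_filter (L : List Int) (hs : L.Pairwise (fun a b => b < a))
    (x : Int) (hx : x ∈ L) :
    L.takeWhile (fun u => u != x) = L.filter (fun u => decide (x < u)) := by
  induction L with
  | nil => rfl
  | cons h t ih =>
    have hh : ∀ b ∈ t, b < h := (List.pairwise_cons.mp hs).1
    have ht : t.Pairwise (fun a b => b < a) := (List.pairwise_cons.mp hs).2
    by_cases hxh : x = h
    · subst hxh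
      have : t.filter (fun u => decide (x < u)) = [] := by
        rw [List.filter_eq_nil_iff]
        intro w hw
        simpa using not_lt.mpr (le_of_lt (hh w hw))
      simp [this]
    · have hxt : x ∈ t := by
        rcases List.mem_cons.mp hx with h1 | h1
        · exact absurd h1 hxh
        · exact h1
      have hxlth : x < h := hh x hxt
      simp [Ne.symm hxh, hxlth, ih ht hxt]

-- Splitting a count by whether the element equals h.
theorem countP_split (p : Int → Bool) (h : Int) (em : List Int) :
    (em.countP p : Int)
      = (if p h then (em.count h : Int) else 0)
        + ((em.filter (fun w => w != h)).countP p : Int) := by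
  induction em with
  | nil => simp
  | cons a l ih =>
    by_cases hah : a = h
    · subst hah
      simp only [List.countP_cons, List.count_cons, List.filter_cons, bne_self_eq_false,
        Bool.false_eq_true, if_false, beq_self_eq_true, if_true]
      split_ifs with hpa
      · rw [if_pos hpa] at ih; omega
      · rw [if_neg hpa] at ih; omega
    · have h1 : (a != h) = true := by simp [hah]
      have h2 : (a == h) = false := by simp [hah]
      have h3 : (h == a) = false := by simp [Ne.symm hah]
      simp only [List.countP_cons, List.count_cons, List.filter_cons, h1, h2,
        Bool.false_eq_true, if_false, if_true]
      by_cases hph : p h = true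
      · rw [if_pos hph] at ih ⊢; split_ifs with hpa <;> omega
      · rw [if_neg hph] at ih ⊢; split_ifs with hpa <;> omega

-- Summing the multiplicities of the distinct values satisfying p recovers countP p.
theorem sum_count_filter (p : Int → Bool) (L : List Int) (em : List Int)
    (hnd : L.Nodup) (hsub : ∀ w ∈ em, p w = true → w ∈ L) :
    ((L.filter p).map (fun u => (em.count u : Int))).sum = (em.countP p : Int) := by
  induction L generalizing em with
  | nil =>
    have : em.countP p = 0 := by
      rw [List.countP_eq_zero]
      intro w hw hp
      exact absurd (hsub w hw hp) List.not_mem_nil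
    simp [this]
  | cons h t ih =>
    have hht : h ∉ t := (List.nodup_cons.mp hnd).1
    have hcnt : ∀ u ∈ t.filter p, (em.count u : Int)
        = ((em.filter (fun w => w != h)).count u : Int) := by
      intro u hu
      have hut : u ∈ t := List.mem_of_mem_filter hu
      have huh : (u != h) = true := by
        simp only [bne_iff_ne, ne_eq]
        intro h1; exact hht (h1 ▸ hut)
      simp [List.count_filter, huh]
    have hih := ih (em.filter (fun w => w != h)) (List.nodup_cons.mp hnd).2
      (by
        intro w hw hp
        have hwm := List.mem_of_mem_filter hw
        have hwh : w ≠ h := by simpa using List.of_mem_filter hw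
        rcases List.mem_cons.mp (hsub w hwm hp) with h1 | h1
        · exact absurd h1 hwh
        · exact h1)
    rw [countP_split p h em, List.filter_cons]
    by_cases hph : p h = true
    · simp only [hph, if_true, List.map_cons, List.sum_cons]
      rw [List.map_congr_left hcnt, hih]
    · simp only [hph, Bool.false_eq_true, if_false]
      rw [List.map_congr_left hcnt, hih]
      omega

-- ===== VERDICT =====
theorem solution_spec : Claim_equal_solution := by
  intro emergency _
  unfold Spec_solution solution solution_alt
  simp only []
  rw [PySem.List.foldl_append_singleton_eq_map, List.nil_append,
    PySem.Dict.foldl_insert_getD_add_one_eq_counter, PySem.Dict.keys_counter]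
  apply List.map_congr_left
  intro x hx
  -- A side: rank(x) = countP (x < ·) emergency + 1
  have hxs : x ∈ PySem.List.sorted emergency (fun x => x) true := by
    rw [PySem.List.mem_sorted]; exact hx
  rw [getD_foldl_insert_keyfun, if_pos hxs,
    index?_desc_eq_countP _ (by simpa using PySem.List.sorted_pairwise_rev emergency (fun x => x)) x hxs]
  -- B side
  have hperm : (PySem.List.sorted (PySem.Set.ofList emergency) (fun x => x) true).Perm
      (PySem.Set.ofList emergency) := PySem.List.sorted_perm _ _ _
  have hnd : (PySem.List.sorted (PySem.Set.ofList emergency) (fun x => x) true).Nodup :=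
    hperm.nodup_iff.mpr (PySem.Set.nodup_ofList emergency)
  have hdesc : (PySem.List.sorted (PySem.Set.ofList emergency) (fun x => x) true).Pairwise
      (fun a b => b < a) := by
    have hle := PySem.List.sorted_pairwise_rev (PySem.Set.ofList emergency) (fun x => x)
    exact (hle.and hnd).imp (fun hp => lt_of_le_of_ne hp.1 (Ne.symm hp.2))
  have hxL : x ∈ PySem.List.sorted (PySem.Set.ofList emergency) (fun x => x) true := by
    rw [PySem.List.mem_sorted, PySem.Set.mem_ofList]; exact hx
  rw [rankfold_getD_mem _ _ _ _ _ _ hnd hxL,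
    takeWhile_desc_eq_filter _ hdesc x hxL]
  have hsum : (((PySem.List.sorted (PySem.Set.ofList emergency) (fun x => x) true).filter
        (fun u => decide (x < u))).map
        (fun v => PySem.Dict.getD (PySem.Dict.counter emergency) v 0)).sum
      = (emergency.countP (fun w => decide (x < w)) : Int) := by
    rw [show (fun v => PySem.Dict.getD (PySem.Dict.counter emergency) v 0)
        = (fun v => (emergency.count v : Int)) from funext (fun v => PySem.Dict.getD_counter _ _)]
    exact sum_count_filter _ _ _ hnd
      (fun w hw _ => by rw [PySem.List.mem_sorted, PySem.Set.mem_ofList]; exact hw)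
  rw [hsum]
  simp
  exact (PySem.List.sorted_perm emergency (fun x => x) true).countP_eq _
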